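-- pv_equiv track=rewrite | github.com/zhanxinqiao/PythonJob | Day2/KM.py | groupPeople
-- ===== SOURCE A (Python) =====
-- def groupPeople(predict, user_id):
--     '''
--     根据预测值与用户卡编号进行分组
--     :param predict: 预测结果
--     :param user_id: 用户卡编码
--     :return: tuple
--     '''
--     res1 = []
--     res2 = []
--     res3 = []
--     res4 = []
--     res5 = []
--     for i in range(len(predict)):
--         if predict[i] == 0:
--             res1.append(user_id[i])
--         elif predict[i] == 1:
--             res2.append(user_id[i])
--         elif predict[i] == 2:
--             res3.append(user_id[i])
--         elif predict[i] == 3: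
--             res4.append(user_id[i])
--         elif predict[i] == 4:
--             res5.append(user_id[i])
--     return res1, res2, res3, res4, res5
-- ===== SOURCE B (Python) =====
-- def groupPeople(predict, user_id):
--     def grp(k):
--         return [u for p, u in zip(predict, user_id) if p == k]
--     return grp(0), grp(1), grp(2), grp(3), grp(4)
-- ===== Notes on version B (the rewrite author's own statement) =====
-- stated objective: simpler
-- what changed: Replaces the single indexed pass that threads five accumulator lists through an if/elif cascade with five independent filtering passes: each group is computed on its own by one comprehension over zip(predict, user_id) selecting the ids whose prediction equals that class.
import Mathlib
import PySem

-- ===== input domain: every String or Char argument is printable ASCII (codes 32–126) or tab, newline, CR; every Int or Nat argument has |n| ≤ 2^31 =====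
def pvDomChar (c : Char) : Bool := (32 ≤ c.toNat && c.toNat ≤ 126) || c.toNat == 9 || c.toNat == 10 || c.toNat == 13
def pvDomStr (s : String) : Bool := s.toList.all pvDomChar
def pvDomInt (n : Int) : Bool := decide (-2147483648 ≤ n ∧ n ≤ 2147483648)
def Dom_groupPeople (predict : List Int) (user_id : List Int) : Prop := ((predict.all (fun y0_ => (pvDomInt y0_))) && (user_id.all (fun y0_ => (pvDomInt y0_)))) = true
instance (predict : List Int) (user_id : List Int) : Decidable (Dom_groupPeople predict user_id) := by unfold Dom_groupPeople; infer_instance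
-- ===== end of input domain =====

-- B computes each of the five groups by its own filtering pass over zip(predict, user_id),
-- instead of A's single indexed pass threading five accumulators through an if/elif cascade; simpler.

-- ===== PORT A =====
def groupPeople (predict : List Int) (user_id : List Int) : List Int × List Int × List Int × List Int × List Int :=
  (PySem.List.pyRange 0 (predict.length : Int) 1).foldl
    (fun (st : List Int × List Int × List Int × List Int × List Int) i =>
      let p := PySem.List.pyGetD predict i 0
      if p = 0 then (st.1 ++ [PySem.List.pyGetD user_id i 0], st.2.1, st.2.2.1, st.2.2.2.1, st.2.2.2.2)
      else if p = 1 then (st.1, st.2.1 ++ [PySem.List.pyGetD user_id i 0], st.2.2.1, st.2.2.2.1, st.2.2.2.2)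
      else if p = 2 then (st.1, st.2.1, st.2.2.1 ++ [PySem.List.pyGetD user_id i 0], st.2.2.2.1, st.2.2.2.2)
      else if p = 3 then (st.1, st.2.1, st.2.2.1, st.2.2.2.1 ++ [PySem.List.pyGetD user_id i 0], st.2.2.2.2)
      else if p = 4 then (st.1, st.2.1, st.2.2.1, st.2.2.2.1, st.2.2.2.2 ++ [PySem.List.pyGetD user_id i 0])
      else st)
    ([], [], [], [], [])

-- ===== PORT B =====
-- grp(k) = [u for p, u in zip(predict, user_id) if p == k]
def pvGrpB (predict : List Int) (user_id : List Int) (k : Int) : List Int :=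
  ((predict.zip user_id).filter (fun pu => pu.1 == k)).map (·.2)

def groupPeople_alt (predict : List Int) (user_id : List Int) : List Int × List Int × List Int × List Int × List Int :=
  (pvGrpB predict user_id 0, pvGrpB predict user_id 1, pvGrpB predict user_id 2,
   pvGrpB predict user_id 3, pvGrpB predict user_id 4)

-- ===== PRECONDITION & SPEC =====
-- Pre_ excludes exactly the inputs on which A raises IndexError: an index i with predict[i] in 0..4
-- but i >= len(user_id) (user_id[i] is only read inside the matching branch).
def Pre_groupPeople (predict : List Int) (user_id : List Int) : Prop :=
  ∀ i < predict.length, (predict.getD i 0 = 0 ∨ predict.getD i 0 = 1 ∨ predict.getD i 0 = 2 ∨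
    predict.getD i 0 = 3 ∨ predict.getD i 0 = 4) → i < user_id.length
instance (predict : List Int) (user_id : List Int) : Decidable (Pre_groupPeople predict user_id) := by unfold Pre_groupPeople; infer_instance
def pvWitness_groupPeople : List Int × List Int := ([0, 4, 1, 7], [10, 20, 30])

def Spec_groupPeople (predict : List Int) (user_id : List Int) (out : List Int × List Int × List Int × List Int × List Int) : Prop := out = groupPeople_alt predict user_id
instance (predict : List Int) (user_id : List Int) (out : List Int × List Int × List Int × List Int × List Int) : Decidable (Spec_groupPeople predict user_id out) := by unfold Spec_groupPeople; infer_instance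

-- ===== CLAIM (what is proved, stated in full; the proofs are below) =====
def Claim_equal_groupPeople : Prop := ∀ (predict : List Int) (user_id : List Int), Dom_groupPeople predict user_id → Pre_groupPeople predict user_id → Spec_groupPeople predict user_id (groupPeople predict user_id)

-- ===== LEMMAS AND PROOFS =====

-- proof helper: a group over an explicit zipped list
def pvGrp (zl : List (Int × Int)) (k : Int) : List Int :=
  (zl.filter (fun p => p.1 == k)).map (·.2)

lemma pvGrpB_eq (predict user_id : List Int) (k : Int) :
    pvGrpB predict user_id k = pvGrp (predict.zip user_id) k := rfl

lemma pvA_partial (predict user_id : List Int) (hpre : Pre_groupPeople predict user_id) :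
    ∀ n, n ≤ predict.length →
      (PySem.List.pyRange 0 (n : Int) 1).foldl
        (fun (st : List Int × List Int × List Int × List Int × List Int) i =>
          let p := PySem.List.pyGetD predict i 0
          if p = 0 then (st.1 ++ [PySem.List.pyGetD user_id i 0], st.2.1, st.2.2.1, st.2.2.2.1, st.2.2.2.2)
          else if p = 1 then (st.1, st.2.1 ++ [PySem.List.pyGetD user_id i 0], st.2.2.1, st.2.2.2.1, st.2.2.2.2)
          else if p = 2 then (st.1, st.2.1, st.2.2.1 ++ [PySem.List.pyGetD user_id i 0], st.2.2.2.1, st.2.2.2.2)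
          else if p = 3 then (st.1, st.2.1, st.2.2.1, st.2.2.2.1 ++ [PySem.List.pyGetD user_id i 0], st.2.2.2.2)
          else if p = 4 then (st.1, st.2.1, st.2.2.1, st.2.2.2.1, st.2.2.2.2 ++ [PySem.List.pyGetD user_id i 0])
          else st)
        ([], [], [], [], []) =
      (pvGrp ((predict.zip user_id).take n) 0, pvGrp ((predict.zip user_id).take n) 1,
       pvGrp ((predict.zip user_id).take n) 2, pvGrp ((predict.zip user_id).take n) 3,
       pvGrp ((predict.zip user_id).take n) 4) := by
  intro n
  induction n with
  | zero => intro _; simp [PySem.List.pyRange, pvGrp]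
  | succ m ih =>
    intro hm
    have hm' : m ≤ predict.length := Nat.le_of_succ_le hm
    have hmp : m < predict.length := hm
    rw [show ((m + 1 : Nat) : Int) = (m : Int) + 1 by push_cast; ring,
        PySem.List.pyRange_one_succ_right (by omega), List.foldl_append, ih hm']
    simp only [List.foldl_cons, List.foldl_nil]
    by_cases hu : m < user_id.length
    · have hz : m < (predict.zip user_id).length := by simp [List.length_zip]; omega
      have htake : (predict.zip user_id).take (m + 1) =
          (predict.zip user_id).take m ++ [(predict[m], user_id[m])] := by
        rw [List.take_add_one, List.getElem?_eq_getElem hz]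
        simp [List.getElem_zip]
      have hp : PySem.List.pyGetD predict (m : Int) 0 = predict[m] := by
        rw [PySem.List.pyGetD_natCast]; simp [List.getD, hmp]
      have huu : PySem.List.pyGetD user_id (m : Int) 0 = user_id[m] := by
        rw [PySem.List.pyGetD_natCast]; simp [List.getD, hu]
      simp only [hp, huu, htake, pvGrp, List.filter_append, List.map_append]
      split_ifs with h0 h1 h2 h3 h4 <;> simp_all
    · have hp : PySem.List.pyGetD predict (m : Int) 0 = predict.getD m 0 := by
        rw [PySem.List.pyGetD_natCast]
      have hnot : ¬ (predict.getD m 0 = 0 ∨ predict.getD m 0 = 1 ∨ predict.getD m 0 = 2 ∨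
          predict.getD m 0 = 3 ∨ predict.getD m 0 = 4) := fun h => hu (hpre m hmp h)
      push Not at hnot
      obtain ⟨h0, h1, h2, h3, h4⟩ := hnot
      simp only [List.getD] at h0 h1 h2 h3 h4
      have htake : (predict.zip user_id).take (m + 1) = (predict.zip user_id).take m := by
        have : (predict.zip user_id).length ≤ m := by simp [List.length_zip]; omega
        rw [List.take_of_length_le this, List.take_of_length_le (by omega)]
      simp [hp, h0, h1, h2, h3, h4, htake]

-- ===== VERDICT (by name: the statement is the Claim_ definition above) =====
theorem groupPeople_spec : Claim_equal_groupPeople := by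
  intro predict user_id _ hpre
  unfold Spec_groupPeople
  have h := pvA_partial predict user_id hpre predict.length le_rfl
  have hfull : (predict.zip user_id).take predict.length = predict.zip user_id := by
    apply List.take_of_length_le; simp [List.length_zip]
  rw [hfull] at h
  simpa [groupPeople, groupPeople_alt, pvGrpB_eq] using h
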